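-- pv_equiv track=rewrite | github.com/g610g/ray-cuda | utility_helpers/utilities.py | partition_reads
-- ===== SOURCE A (Python) =====
-- def partition_reads(num_partition, reads_len)->list:
--     bounds = []
--     start = 0
--     reads_per_task = reads_len // num_partition
--     remainder = reads_len % num_partition
--     for i in range(5):
--         extra = 1 if i < remainder else 0  # Distribute remainder to first GPUs
--         end = start + reads_per_task + extra
--         bounds.append([start, end, end - start])
--         start = end
--     return bounds
-- ===== SOURCE B (Python) =====
-- def partition_reads(num_partition, reads_len) -> list:
--     # Stateless closed form: the i-th chunk's start is i*q plus the number of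
--     # earlier chunks that received one remainder unit, i.e. clamp(r, 0, i).
--     q, r = divmod(reads_len, num_partition)
--     def bound(i):
--         return i * q + min(max(r, 0), i)
--     return [[bound(i), bound(i + 1), bound(i + 1) - bound(i)] for i in range(5)]
-- ===== Notes on version B (the rewrite author's own statement) =====
-- stated objective: simpler
-- what changed: Replaced the loop-carried start/end accumulator with a stateless closed form: each bound is i*q + clamp(r,0,i) computed independently in a comprehension.
import Mathlib
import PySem

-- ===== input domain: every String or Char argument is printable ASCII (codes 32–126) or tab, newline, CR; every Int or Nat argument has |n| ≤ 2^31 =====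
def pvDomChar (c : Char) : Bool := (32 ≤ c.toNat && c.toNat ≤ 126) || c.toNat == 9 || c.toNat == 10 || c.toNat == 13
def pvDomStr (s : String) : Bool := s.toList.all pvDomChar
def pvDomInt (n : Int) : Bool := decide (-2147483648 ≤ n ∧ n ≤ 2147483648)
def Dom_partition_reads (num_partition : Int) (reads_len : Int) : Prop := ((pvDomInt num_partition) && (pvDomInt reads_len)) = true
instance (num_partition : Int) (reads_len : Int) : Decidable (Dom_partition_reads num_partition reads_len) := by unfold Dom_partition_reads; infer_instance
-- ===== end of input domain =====

-- B replaces A's loop-carried start/end accumulator by a stateless closed form per bound (objective: simpler).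

-- ===== PORT A =====
-- literal transliteration of A: foldl over range(5) carrying (bounds, start)
def partition_reads (num_partition : Int) (reads_len : Int) : List (List Int) :=
  let reads_per_task := PySem.Int.floordiv reads_len num_partition
  let remainder := PySem.Int.mod reads_len num_partition
  let st := (PySem.List.pyRange 0 5 1).foldl
    (fun (s : List (List Int) × Int) (i : Int) =>
      let extra : Int := if i < remainder then 1 else 0
      let «end» := s.2 + reads_per_task + extra
      (s.1 ++ [[s.2, «end», «end» - s.2]], «end»))
    ([], 0)
  st.1

-- ===== PORT B =====
def pvBound (q r : Int) (i : Int) : Int := i * q + min (max r 0) i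

def partition_reads_alt (num_partition : Int) (reads_len : Int) : List (List Int) :=
  let q := PySem.Int.floordiv reads_len num_partition
  let r := PySem.Int.mod reads_len num_partition
  (PySem.List.pyRange 0 5 1).map
    (fun i => [pvBound q r i, pvBound q r (i + 1), pvBound q r (i + 1) - pvBound q r i])

-- ===== PRECONDITION & SPEC =====
-- Pre_ excludes exactly num_partition = 0, where A raises ZeroDivisionError.
def Pre_partition_reads (num_partition : Int) (reads_len : Int) : Prop := num_partition ≠ 0
instance (num_partition : Int) (reads_len : Int) : Decidable (Pre_partition_reads num_partition reads_len) := by unfold Pre_partition_reads; infer_instance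
def pvWitness_partition_reads : Int × Int := (3, 10)

def Spec_partition_reads (num_partition : Int) (reads_len : Int) (out : List (List Int)) : Prop := out = partition_reads_alt num_partition reads_len
instance (num_partition : Int) (reads_len : Int) (out : List (List Int)) : Decidable (Spec_partition_reads num_partition reads_len out) := by unfold Spec_partition_reads; infer_instance

-- ===== CLAIM (what is proved, stated in full; the proofs are below) =====
def Claim_equal_partition_reads : Prop := ∀ (num_partition : Int) (reads_len : Int), Dom_partition_reads num_partition reads_len → Pre_partition_reads num_partition reads_len → Spec_partition_reads num_partition reads_len (partition_reads num_partition reads_len)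

-- ===== LEMMAS AND PROOFS =====

-- The remainder has the sign of the divisor, so for nonzero divisor it is 0 iff clamp does nothing.
theorem pv_mod_sign (a b : Int) (hb : b ≠ 0) :
    (0 < b → 0 ≤ PySem.Int.mod a b) ∧ (b < 0 → PySem.Int.mod a b ≤ 0) := by
  constructor
  · intro h; exact PySem.Int.mod_nonneg a h
  · intro h; exact (PySem.Int.mod_neg_bounds a h).2

-- ===== VERDICT (by name: the statement is the Claim_ definition above) =====
theorem partition_reads_spec : Claim_equal_partition_reads := by
  intro np rl _ hpre
  unfold Spec_partition_reads partition_reads partition_reads_alt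
  have h := pv_mod_sign rl np hpre
  rcases lt_trichotomy np 0 with hn | hz | hp
  · have hr : PySem.Int.mod rl np ≤ 0 := h.2 hn
    simp [PySem.List.pyRange, pvBound, List.range_succ]
    split_ifs <;> omega
  · exact absurd hz hpre
  · have hr : 0 ≤ PySem.Int.mod rl np := h.1 hp
    simp [PySem.List.pyRange, pvBound, List.range_succ]
    split_ifs <;> omega
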